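-- pv_equiv track=rewrite | github.com/belal-bh/competitive-programming | Codeforces/contest_1520/a.py | solve
-- ===== SOURCE A (Python) =====
-- def solve(tasks):
--     d = {}
--     l = len(tasks)
--     i = 0
--     while i < l:
--         if d.get(tasks[i], None):
--             return 'NO'
--         else:
--             d[tasks[i]] = True
--             ct = tasks[i]
--             i += 1
--             while i < l:
--                 if tasks[i] != ct:
--                     i -= 1
--                     break
--                 i += 1
--         i += 1
--     return 'YES'
-- ===== SOURCE B (Python) =====
-- def solve(tasks):
--     groups = []
--     first = True
--     prev = None
--     for t in tasks:
--         if first or t != prev: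
--             groups.append(t)
--         first = False
--         prev = t
--     return 'YES' if len(groups) == len(set(groups)) else 'NO'
-- ===== Notes on version B (the rewrite author's own statement) =====
-- stated objective: simpler
-- what changed: B replaces A's nested index-walking scan with an in-scan dict membership early-return by a two-phase decomposition: one pass run-length-compresses the list into its block leaders, then a single uniqueness check len(groups) == len(set(groups)) decides the answer.
import Mathlib
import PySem

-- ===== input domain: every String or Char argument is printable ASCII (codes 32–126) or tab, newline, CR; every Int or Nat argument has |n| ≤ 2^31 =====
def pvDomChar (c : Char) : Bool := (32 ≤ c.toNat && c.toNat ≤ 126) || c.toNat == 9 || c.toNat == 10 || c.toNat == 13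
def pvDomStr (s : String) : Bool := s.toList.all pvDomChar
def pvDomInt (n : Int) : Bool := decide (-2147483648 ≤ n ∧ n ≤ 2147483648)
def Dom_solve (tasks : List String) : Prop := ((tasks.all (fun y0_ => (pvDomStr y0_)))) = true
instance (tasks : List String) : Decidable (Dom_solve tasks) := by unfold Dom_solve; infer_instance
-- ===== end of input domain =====

-- B rewrites A's nested scan (dict lookup + inner skip loop, early return) as a two-phase
-- pass: run-length-compress to block leaders, then one uniqueness check (objective: simpler).

-- ===== PORT A =====
-- inner while loop: skip forward while tasks[i] == ct, then step back one
-- (tasks.getD i "" is tasks[i]; the loop only reads it under i < l, so the default is never used)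
def solveSkip (tasks : List String) (l : Nat) (ct : String) (i : Nat) : Nat :=
  if i < l then
    if tasks.getD i "" ≠ ct then i - 1
    else solveSkip tasks l ct (i + 1)
  else i
termination_by l - i

-- termination helper for the outer loop: the inner loop never moves below i - 1
lemma solveSkip_ge (tasks : List String) (l : Nat) (ct : String) :
    ∀ i : Nat, i - 1 ≤ solveSkip tasks l ct i := by
  intro i
  induction hn : l - i using Nat.strong_induction_on generalizing i with
  | _ n ih =>
    unfold solveSkip
    split
    · split
      · omega
      · have := ih (l - (i + 1)) (by omega) (i + 1) rfl
        omega
    · omega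

-- outer while loop of A; `(d.get? key).getD false` is the truthiness of d.get(tasks[i], None)
def solveLoop (tasks : List String) (l : Nat) (d : PySem.Dict String Bool) (i : Nat) : String :=
  if h : i < l then
    if (d.get? (tasks.getD i "")).getD false then "NO"
    else
      solveLoop tasks l (d.insert (tasks.getD i "") true)
        (solveSkip tasks l (tasks.getD i "") (i + 1) + 1)
  else "YES"
termination_by l - i
decreasing_by
  have := solveSkip_ge tasks l (tasks.getD i "") (i + 1)
  omega

def solve (tasks : List String) : String :=
  solveLoop tasks tasks.length PySem.Dict.empty 0

-- ===== PORT B =====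
-- one fold step of Source B's loop: state = (groups, first, prev)
def stepB (st : List String × Bool × Option String) (t : String) :
    List String × Bool × Option String :=
  (if st.2.1 || !(some t == st.2.2) then st.1 ++ [t] else st.1, false, some t)

def solve_alt (tasks : List String) : String :=
  let st := tasks.foldl stepB ([], true, none)
  if st.1.length = (PySem.Set.ofList st.1).length then "YES" else "NO"

-- ===== PRECONDITION & SPEC =====
def Spec_solve (tasks : List String) (out : String) : Prop := out = solve_alt tasks
instance (tasks : List String) (out : String) : Decidable (Spec_solve tasks out) := by unfold Spec_solve; infer_instance

-- ===== CLAIM (what is proved, stated in full; the proofs are below) =====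
def Claim_equal_solve : Prop := ∀ (tasks : List String), Dom_solve tasks → Spec_solve tasks (solve tasks)

-- ===== LEMMAS AND PROOFS =====

-- block leaders of the run-length compression, relative to a previous element p
def leadersP : String → List String → List String
  | _, [] => []
  | p, t :: rest => if t == p then leadersP p rest else t :: leadersP t rest

def leaders : List String → List String
  | [] => []
  | t :: rest => t :: leadersP t rest

-- list-level reference model of A's outer loop
def loopP : String → PySem.Dict String Bool → List String → String
  | _, _, [] => "YES"
  | p, d, t :: rest =>
    if t == p then loopP p d rest
    else if (d.get? t).getD false then "NO"
    else loopP t (d.insert t true) rest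

def loopRuns (d : PySem.Dict String Bool) : List String → String
  | [] => "YES"
  | t :: rest =>
    if (d.get? t).getD false then "NO"
    else loopP t (d.insert t true) rest

lemma loopP_eq_loopRuns (xs : List String) : ∀ p d,
    loopP p d xs = loopRuns d (xs.dropWhile (· == p)) := by
  induction xs with
  | nil => intro p d; rfl
  | cons t rest ih =>
    intro p d
    by_cases h : t = p
    · subst h; simp [loopP, ih]
    · simp [loopP, h, loopRuns]

lemma getD_insert_true (d : PySem.Dict String Bool) (t s : String) :
    ((d.insert t true).get? s).getD false = (s == t || (d.get? s).getD false) := by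
  rw [← PySem.Dict.getD_eq_get?_getD, ← PySem.Dict.getD_eq_get?_getD,
    PySem.Dict.getD_insert]
  by_cases h : s = t <;> simp [h]

lemma loopP_char (xs : List String) : ∀ (p : String) (d : PySem.Dict String Bool),
    loopP p d xs =
      if (leadersP p xs).Nodup ∧ ∀ t ∈ leadersP p xs, ((d.get? t).getD false) = false
      then "YES" else "NO" := by
  induction xs with
  | nil => intro p d; simp [loopP, leadersP]
  | cons t rest ih =>
    intro p d
    by_cases h : t = p
    · subst h; simp [loopP, leadersP, ih]
    · simp only [loopP, leadersP, beq_iff_eq, h, if_false]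
      by_cases hd : ((d.get? t).getD false) = true
      · rw [if_pos hd, if_neg]
        intro ⟨_, hall⟩
        have := hall t (by simp)
        simp [this] at hd
      · rw [if_neg (by simp [hd]), ih]
        congr 1
        simp only [List.nodup_cons, List.mem_cons, eq_iff_iff]
        constructor
        · intro ⟨hn, hall⟩
          refine ⟨⟨?_, hn⟩, ?_⟩
          · intro hmem
            have := hall t hmem
            rw [getD_insert_true] at this; simp at this
          · intro s hs
            rcases hs with hs | hs
            · subst hs; simpa using hd
            · have := hall s hs
              rw [getD_insert_true] at this
              simp at this; exact this.2
        · intro ⟨⟨hnot, hn⟩, hall⟩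
          refine ⟨hn, ?_⟩
          intro s hs
          rw [getD_insert_true]
          have hne : s ≠ t := fun he => hnot (he ▸ hs)
          simp [hne, hall s (Or.inr hs)]

lemma loopRuns_char (xs : List String) (d : PySem.Dict String Bool) :
    loopRuns d xs =
      if (leaders xs).Nodup ∧ ∀ t ∈ leaders xs, ((d.get? t).getD false) = false
      then "YES" else "NO" := by
  cases xs with
  | nil => simp [loopRuns, leaders]
  | cons t rest =>
    simp only [loopRuns, leaders]
    by_cases hd : ((d.get? t).getD false) = true
    · rw [if_pos hd, if_neg]
      intro ⟨_, hall⟩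
      have := hall t (by simp)
      simp [this] at hd
    · rw [if_neg (by simp [hd]), loopP_char]
      congr 1
      simp only [List.nodup_cons, List.mem_cons, eq_iff_iff]
      constructor
      · intro ⟨hn, hall⟩
        refine ⟨⟨?_, hn⟩, ?_⟩
        · intro hmem
          have := hall t hmem
          rw [getD_insert_true] at this; simp at this
        · intro s hs
          rcases hs with hs | hs
          · subst hs; simpa using hd
          · have := hall s hs
            rw [getD_insert_true] at this
            simp at this; exact this.2
      · intro ⟨⟨hnot, hn⟩, hall⟩
        refine ⟨hn, ?_⟩
        intro s hs
        rw [getD_insert_true]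
        have hne : s ≠ t := fun he => hnot (he ▸ hs)
        simp [hne, hall s (Or.inr hs)]

-- the inner skip loop lands exactly past the current run
lemma solveSkip_drop (tasks : List String) (ct : String) :
    ∀ n k, tasks.length - k ≤ n → 1 ≤ k →
      tasks.drop (solveSkip tasks tasks.length ct k + 1) =
        (tasks.drop k).dropWhile (· == ct) := by
  intro n
  induction n with
  | zero =>
    intro k hn _
    have hk : tasks.length ≤ k := by omega
    unfold solveSkip
    rw [if_neg (by omega)]
    rw [List.drop_eq_nil_of_le hk, List.drop_eq_nil_of_le (by omega)]
    rfl
  | succ m ih =>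
    intro k hn hk1
    by_cases hk : k < tasks.length
    · have hdrop : tasks.drop k = tasks[k] :: tasks.drop (k + 1) :=
        List.drop_eq_getElem_cons hk
      have hgetD : tasks.getD k "" = tasks[k] := List.getD_eq_getElem tasks "" hk
      unfold solveSkip
      rw [if_pos hk, hgetD]
      by_cases hne : tasks[k] = ct
      · rw [if_neg (by simp [hne]), ih (k + 1) (by omega) (by omega), hdrop,
          List.dropWhile_cons]
        simp [hne]
      · rw [if_pos hne]
        have : k - 1 + 1 = k := by omega
        rw [this, hdrop, List.dropWhile_cons]
        simp [hne]
    · unfold solveSkip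
      rw [if_neg hk]
      rw [List.drop_eq_nil_of_le (by omega), List.drop_eq_nil_of_le (by omega)]
      rfl

-- A's outer loop equals the list-level model on the remaining suffix
lemma solveLoop_eq (tasks : List String) :
    ∀ n i d, tasks.length - i ≤ n →
      solveLoop tasks tasks.length d i = loopRuns d (tasks.drop i) := by
  intro n
  induction n with
  | zero =>
    intro i d hn
    unfold solveLoop
    rw [dif_neg (by omega), List.drop_eq_nil_of_le (by omega)]
    rfl
  | succ m ih =>
    intro i d hn
    by_cases hi : i < tasks.length
    · have hdrop : tasks.drop i = tasks[i] :: tasks.drop (i + 1) :=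
        List.drop_eq_getElem_cons hi
      have hgetD : tasks.getD i "" = tasks[i] := List.getD_eq_getElem tasks "" hi
      unfold solveLoop
      rw [dif_pos hi, hgetD, hdrop]
      simp only [loopRuns]
      by_cases hd : ((d.get? tasks[i]).getD false) = true
      · rw [if_pos hd, if_pos hd]
      · rw [if_neg (by simp [hd]), if_neg (by simp [hd])]
        have hskip := solveSkip_ge tasks tasks.length tasks[i] (i + 1)
        rw [ih (solveSkip tasks tasks.length tasks[i] (i + 1) + 1)
              (d.insert tasks[i] true) (by omega)]
        rw [solveSkip_drop tasks tasks[i] (tasks.length - (i + 1)) (i + 1) (by omega) (by omega)]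
        rw [loopP_eq_loopRuns]
    · unfold solveLoop
      rw [dif_neg hi, List.drop_eq_nil_of_le (by omega)]
      rfl

lemma solve_char (tasks : List String) :
    solve tasks = if (leaders tasks).Nodup then "YES" else "NO" := by
  rw [solve, solveLoop_eq tasks tasks.length 0 PySem.Dict.empty (by omega),
    List.drop_zero, loopRuns_char]
  congr 1
  simp [PySem.Dict.get?_empty]

-- B's fold builds exactly the leaders list
lemma foldB_first (xs : List String) : ∀ (g : List String) (p : String),
    (xs.foldl stepB (g, false, some p)).1 = g ++ leadersP p xs := by
  induction xs with
  | nil => intro g p; simp [leadersP]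
  | cons t rest ih =>
    intro g p
    by_cases h : t = p
    · subst h
      simp only [List.foldl_cons, stepB]
      simp [ih, leadersP]
    · simp only [List.foldl_cons, stepB]
      have : (some t == some p) = false := by simp [h]
      simp only [this, Bool.not_false, Bool.or_true, if_pos]
      simp [ih, leadersP, h]

lemma groups_eq_leaders (tasks : List String) :
    (tasks.foldl stepB ([], true, none)).1 = leaders tasks := by
  cases tasks with
  | nil => rfl
  | cons t rest =>
    simp only [List.foldl_cons, stepB]
    simp only [Bool.true_or, if_pos]
    rw [show ((([] : List String) ++ [t], false, some t) :
        List String × Bool × Option String) = ([t], false, some t) by simp]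
    rw [foldB_first]
    rfl

-- length of the distinct-element list equals the length iff no duplicates
lemma ofList_length_iff (L : List String) :
    (PySem.Set.ofList L).length = L.length ↔ L.Nodup := by
  constructor
  · intro h
    have hsub : (PySem.Set.ofList L).toFinset = L.toFinset := by
      apply Finset.ext
      intro a
      simp [List.mem_toFinset, PySem.Set.mem_ofList]
    have hn : (PySem.Set.ofList L).Nodup := PySem.Set.nodup_ofList L
    have h1 : (PySem.Set.ofList L).toFinset.card = (PySem.Set.ofList L).length :=
      List.toFinset_card_of_nodup hn
    have h2 : L.toFinset.card = L.dedup.length := L.card_toFinset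
    have hlen : L.dedup.length = L.length := by
      rw [← h2, ← hsub, h1, h]
    have := List.Sublist.eq_of_length (List.dedup_sublist L) hlen
    rw [← this]
    exact L.nodup_dedup
  · intro h
    rw [PySem.Set.ofList_eq_self_of_nodup L h]

lemma solve_alt_char (tasks : List String) :
    solve_alt tasks = if (leaders tasks).Nodup then "YES" else "NO" := by
  rw [solve_alt]
  simp only [groups_eq_leaders]
  by_cases h : (leaders tasks).Nodup
  · rw [if_pos h, if_pos ((ofList_length_iff _).2 h).symm]
  · rw [if_neg h, if_neg (fun he => h ((ofList_length_iff _).1 he.symm))]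

-- ===== VERDICT (by name: the statement is the Claim_ definition above) =====
theorem solve_spec : Claim_equal_solve := by
  intro tasks _
  unfold Spec_solve
  rw [solve_char, solve_alt_char]
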